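-- pv_equiv track=rewrite | github.com/NguyenDoanHoangPhuc/CT294 | phuc/main.py | turn_to_clusters
-- ===== SOURCE A (Python) =====
-- def turn_to_clusters(partition):
--     clusters = {}
--
--     for session_id, cluster_id in partition.items():
--         if cluster_id not in clusters:
--             clusters[cluster_id] = []
--         clusters[cluster_id].append(session_id)
--
--     filtered_clusters = {cluster_id: members for cluster_id, members in clusters.items() if len(members) > 1}
--     return filtered_clusters
-- ===== SOURCE B (Python) =====
-- def turn_to_clusters(partition):
--     # One counting pass, then one building pass that never creates singleton
--     # lists and needs no post-filter.
--     counts = {}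
--     for cluster_id in partition.values():
--         counts[cluster_id] = counts.get(cluster_id, 0) + 1
--     result = {}
--     for session_id, cluster_id in partition.items():
--         if counts[cluster_id] > 1:
--             result.setdefault(cluster_id, []).append(session_id)
--     return result
-- ===== Notes on version B (the rewrite author's own statement) =====
-- stated objective: alternative
-- what changed: Instead of grouping everything into lists and then filtering out singleton lists with a dict comprehension, B first builds a cluster->count table and in a second pass appends sessions only for clusters whose count exceeds 1, so singleton lists are never built and there is no filter step.
import Mathlib
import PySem

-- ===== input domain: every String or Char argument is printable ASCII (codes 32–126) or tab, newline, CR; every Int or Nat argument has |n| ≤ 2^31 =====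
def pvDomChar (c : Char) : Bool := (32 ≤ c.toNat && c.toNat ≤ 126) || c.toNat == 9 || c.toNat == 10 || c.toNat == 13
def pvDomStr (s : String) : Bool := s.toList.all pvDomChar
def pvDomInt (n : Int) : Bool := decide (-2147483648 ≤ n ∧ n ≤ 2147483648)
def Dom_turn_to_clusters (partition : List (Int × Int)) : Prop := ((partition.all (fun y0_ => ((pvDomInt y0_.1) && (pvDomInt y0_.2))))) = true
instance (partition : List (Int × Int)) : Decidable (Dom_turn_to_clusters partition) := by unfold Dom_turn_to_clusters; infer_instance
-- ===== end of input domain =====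

-- B replaces A's group-everything-then-filter-singletons with a count pass plus a
-- guarded second pass that never builds singleton lists (alternative decomposition, same cost).


-- ===== PORT A =====
def turn_to_clusters (partition : List (Int × Int)) : List (Int × List Int) :=
  let clusters : PySem.Dict Int (List Int) := partition.foldl
    (fun clusters p =>
      let clusters := if clusters.contains p.2 then clusters else clusters.insert p.2 []
      clusters.modify p.2 [] (fun m => m ++ [p.1]))
    PySem.Dict.empty
  clusters.items.filter (fun q => decide (1 < q.2.length))

-- ===== PORT B =====
def turn_to_clusters_alt (partition : List (Int × Int)) : List (Int × List Int) :=
  let counts : PySem.Dict Int Int := (partition.map (·.2)).foldl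
    (fun d c => d.insert c (d.getD c 0 + 1)) PySem.Dict.empty
  let result : PySem.Dict Int (List Int) := partition.foldl
    (fun d p =>
      if 1 < counts.getD p.2 0 then
        (d.setdefault p.2 []).modify p.2 [] (fun m => m ++ [p.1])
      else d)
    PySem.Dict.empty
  result.items

-- ===== PRECONDITION & SPEC =====
def Spec_turn_to_clusters (partition : List (Int × Int)) (out : List (Int × List Int)) : Prop := out = turn_to_clusters_alt partition
instance (partition : List (Int × Int)) (out : List (Int × List Int)) : Decidable (Spec_turn_to_clusters partition out) := by unfold Spec_turn_to_clusters; infer_instance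

-- ===== CLAIM (what is proved, stated in full; the proofs are below) =====
def Claim_equal_turn_to_clusters : Prop := ∀ (partition : List (Int × Int)), Dom_turn_to_clusters partition → Spec_turn_to_clusters partition (turn_to_clusters partition)

-- ===== LEMMAS AND PROOFS =====

-- the members of cluster c, in order of appearance
def pvMembers (l : List (Int × Int)) (c : Int) : List Int :=
  (l.filter (fun p => p.2 == c)).map (·.1)

-- the plain grouping fold both ports' loops reduce to
def pvGroup (l : List (Int × Int)) : PySem.Dict Int (List Int) :=
  l.foldl (fun d p => d.modify p.2 [] (fun m => m ++ [p.1])) PySem.Dict.empty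

-- insert of the default into a dict missing the key, then modify = modify directly
theorem pv_insert_modify (d : PySem.Dict Int (List Int)) (c : Int) (s : Int)
    (h : d.contains c = false) :
    (d.insert c []).modify c [] (fun m => m ++ [s]) = d.modify c [] (fun m => m ++ [s]) := by
  simp [PySem.Dict.modify, PySem.Dict.getD_insert_self, PySem.Dict.insert_insert_self,
    PySem.Dict.getD_of_not_contains d _ h]

theorem pv_stepA (d : PySem.Dict Int (List Int)) (p : Int × Int) :
    (if d.contains p.2 then d else d.insert p.2 ([] : List Int)).modify p.2 []
        (fun m => m ++ [p.1])
      = d.modify p.2 [] (fun m => m ++ [p.1]) := by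
  by_cases h : d.contains p.2
  · simp [h]
  · simp only [h, Bool.false_eq_true, ite_false]
    exact pv_insert_modify d p.2 p.1 (by simpa using h)

theorem pv_stepB (d : PySem.Dict Int (List Int)) (p : Int × Int) :
    (d.setdefault p.2 []).modify p.2 [] (fun m => m ++ [p.1])
      = d.modify p.2 [] (fun m => m ++ [p.1]) := by
  by_cases h : d.contains p.2
  · rw [PySem.Dict.setdefault_of_contains d _ h]
  · rw [PySem.Dict.setdefault_of_not_contains d _ (by simpa using h)]
    exact pv_insert_modify d p.2 p.1 (by simpa using h)

theorem pv_members_len (l : List (Int × Int)) (c : Int) :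
    (pvMembers l c).length = (l.map (·.2)).count c := by
  simp only [pvMembers, List.length_map]
  rw [List.count_eq_countP, List.countP_map, List.countP_eq_length_filter]
  rfl

-- the grouping dict, characterised: first-appearance keys, in-order members
theorem pv_group_items (l : List (Int × Int)) :
    (pvGroup l).items
      = (PySem.Set.ofList (l.map (·.2))).map (fun c => (c, pvMembers l c)) := by
  have hnd : (pvGroup l).keys.Nodup := by
    apply PySem.Dict.nodup_keys_foldl_modify_key l (·.2) [] (fun _ p m => m ++ [p.1])
    simp [PySem.Dict.keys_empty]
  have hkeys : (pvGroup l).keys = PySem.Set.ofList (l.map (·.2)) := by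
    rw [pvGroup, PySem.Dict.keys_foldl_modify_key l (·.2) [] (fun _ p m => m ++ [p.1])]
    rw [PySem.Dict.keys_empty, PySem.Set.update_nil_left]
  have hgetD : ∀ c, (pvGroup l).getD c [] = pvMembers l c := by
    intro c
    have hswap : pvGroup l
        = (l.map (fun p => (p.2, p.1))).foldl
            (fun d p => d.modify p.1 [] (fun m => m ++ [p.2])) PySem.Dict.empty := by
      rw [pvGroup, List.foldl_map]
    rw [hswap, PySem.Dict.getD_foldl_modify_append, List.filter_map]
    simp [pvMembers, Function.comp_def]
  rw [PySem.Dict.items_eq_map_keys _ hnd [], hkeys]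
  exact List.map_congr_left (fun c _ => by rw [hgetD c])

-- ordered dedup commutes with filter
theorem pv_ofList_filter (q : Int → Bool) (xs : List Int) :
    PySem.Set.ofList (xs.filter q) = (PySem.Set.ofList xs).filter q := by
  induction xs with
  | nil => rfl
  | cons x xs ih =>
    by_cases h : q x
    · rw [List.filter_cons_of_pos h, PySem.Set.ofList_cons, PySem.Set.ofList_cons, ih]
      rw [List.filter_cons_of_pos h]
      simp [PySem.Set.discard, List.filter_filter, Bool.and_comm]
    · rw [List.filter_cons_of_neg h, PySem.Set.ofList_cons, ih]
      rw [List.filter_cons_of_neg h]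
      simp only [PySem.Set.discard, List.filter_filter]
      apply List.filter_congr
      intro y _
      by_cases hy : y = x
      · subst hy; simp [h]
      · simp [hy]

-- restricting the pair list to kept clusters does not change a kept cluster's members
theorem pv_members_filter (l : List (Int × Int)) (q : Int → Bool) (c : Int) (hc : q c = true) :
    pvMembers (l.filter (fun p => q p.2)) c = pvMembers l c := by
  unfold pvMembers
  rw [List.filter_filter]
  congr 1
  apply List.filter_congr
  intro p _
  by_cases hp : p.2 = c
  · simp [hp, hc]
  · simp [hp]

-- A's result in closed form
theorem pv_A_norm (partition : List (Int × Int)) :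
    turn_to_clusters partition
      = ((PySem.Set.ofList (partition.map (·.2))).filter
            (fun c => decide (1 < (pvMembers partition c).length))).map
          (fun c => (c, pvMembers partition c)) := by
  have hstep : (fun (d : PySem.Dict Int (List Int)) (p : Int × Int) =>
        (if d.contains p.2 then d else d.insert p.2 ([] : List Int)).modify p.2 []
          (fun m => m ++ [p.1]))
      = fun d p => d.modify p.2 [] (fun m => m ++ [p.1]) :=
    funext fun d => funext fun p => pv_stepA d p
  show (partition.foldl (fun (d : PySem.Dict Int (List Int)) (p : Int × Int) =>
        (if d.contains p.2 then d else d.insert p.2 ([] : List Int)).modify p.2 []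
          (fun m => m ++ [p.1])) PySem.Dict.empty).items.filter
      (fun q => decide (1 < q.2.length)) = _
  rw [hstep]
  rw [show partition.foldl (fun (d : PySem.Dict Int (List Int)) p =>
        d.modify p.2 [] (fun m => m ++ [p.1])) PySem.Dict.empty = pvGroup partition from rfl]
  rw [pv_group_items, List.filter_map]
  rfl

theorem turn_to_clusters_spec_aux (partition : List (Int × Int)) :
    turn_to_clusters partition = turn_to_clusters_alt partition := by
  set q : Int → Bool := fun c => decide ((1 : Int) < ((partition.map (·.2)).count c : Int)) with hq
  have hcounts : ∀ c, ((partition.map (·.2)).foldl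
      (fun d x => d.insert x (d.getD x 0 + 1)) PySem.Dict.empty).getD c 0
        = ((partition.map (·.2)).count c : Int) := by
    intro c
    rw [PySem.Dict.getD_foldl_insert_add_one]
    simp [PySem.Dict.getD_empty]
  -- B = grouping of the filtered list
  have hB : turn_to_clusters_alt partition
      = (pvGroup (partition.filter (fun p => q p.2))).items := by
    have hstep2 : (fun (d : PySem.Dict Int (List Int)) (p : Int × Int) =>
          if 1 < ((partition.map (·.2)).foldl
              (fun d c => d.insert c (d.getD c 0 + 1))
              (PySem.Dict.empty : PySem.Dict Int Int)).getD p.2 0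
          then (d.setdefault p.2 []).modify p.2 [] (fun m => m ++ [p.1]) else d)
        = fun d p => if q p.2 then d.modify p.2 [] (fun m => m ++ [p.1]) else d := by
      funext d p
      rw [hcounts p.2]
      by_cases h : q p.2
      · rw [if_pos h, if_pos (by simpa [hq] using h)]
        exact pv_stepB d p
      · rw [if_neg h, if_neg (by simpa [hq] using h)]
    show (partition.foldl (fun (d : PySem.Dict Int (List Int)) (p : Int × Int) =>
          if 1 < ((partition.map (·.2)).foldl
              (fun d c => d.insert c (d.getD c 0 + 1))
              (PySem.Dict.empty : PySem.Dict Int Int)).getD p.2 0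
          then (d.setdefault p.2 []).modify p.2 [] (fun m => m ++ [p.1]) else d)
        PySem.Dict.empty).items = _
    rw [hstep2, pvGroup, List.foldl_filter]
  rw [pv_A_norm, hB, pv_group_items]
  have hk : (partition.filter (fun p => q p.2)).map (·.2)
      = (partition.map (·.2)).filter q := by
    rw [List.filter_map]
    rfl
  rw [hk, pv_ofList_filter]
  have hpred : (PySem.Set.ofList (partition.map (·.2))).filter
        (fun c => decide (1 < (pvMembers partition c).length))
      = (PySem.Set.ofList (partition.map (·.2))).filter q := by
    apply List.filter_congr
    intro c _
    rw [hq]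
    apply decide_eq_decide.mpr
    rw [pv_members_len]
    constructor <;> intro h <;> exact_mod_cast h
  rw [hpred]
  apply List.map_congr_left
  intro c hc
  have hqc : q c = true := (List.mem_filter.mp hc).2
  rw [pv_members_filter partition q c hqc]

-- ===== VERDICT (by name: the statement is the Claim_ definition above) =====
theorem turn_to_clusters_spec : Claim_equal_turn_to_clusters := by
  intro partition _
  unfold Spec_turn_to_clusters
  exact turn_to_clusters_spec_aux partition
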